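-- pv_equiv track=rewrite | github.com/lovelypoet/SilentVoix | worker-fusion-preprocess/app.py | _infer_schema_id
-- ===== SOURCE A (Python) =====
-- def _count_landmark_dims(header: list[str], prefix: str) -> int:
--     columns = set(header)
--     dim = 0
--     for idx in range(21):
--         for axis in ("x", "y", "z"):
--             if f"{prefix}_{axis}{idx}" in columns:
--                 dim += 1
--     return dim
--
-- def _infer_schema_id(header: list[str]) -> str:
--     columns = set(header)
--     has_sensor = any(col.startswith("sensor_") for col in columns)
--     if has_sensor:
--         if any(col.startswith("sensor_left_") or col.startswith("sensor_right_") for col in columns):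
--             return "fusion_dual"
--         return "fusion_single"
--     if _count_landmark_dims(header, "L") + _count_landmark_dims(header, "R") > 0:
--         return "cv_dual" if _count_landmark_dims(header, "R") == 63 else "cv_single"
--     return "unknown"
-- ===== SOURCE B (Python) =====
-- def _is_landmark(col, p):
--     # '<p>_<axis><idx>' with axis in xyz and idx a canonical decimal 0..20
--     if len(col) == 4:
--         return col[0] == p and col[1] == '_' and col[2] in 'xyz' and '0' <= col[3] <= '9'
--     if len(col) == 5:
--         return (col[0] == p and col[1] == '_' and col[2] in 'xyz'
--                 and '0' <= col[4] <= '9'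
--                 and (col[3] == '1' or (col[3] == '2' and col[4] == '0')))
--     return False
--
-- def _infer_schema_id(header: list[str]) -> str:
--     columns = set(header)
--     has_sensor = any(col.startswith("sensor_") for col in columns)
--     if has_sensor:
--         if any(col.startswith("sensor_left_") or col.startswith("sensor_right_") for col in columns):
--             return "fusion_dual"
--         return "fusion_single"
--     r = sum(1 for col in columns if _is_landmark(col, 'R'))
--     l = sum(1 for col in columns if _is_landmark(col, 'L'))
--     if r + l == 0:
--         return "unknown"
--     return "cv_dual" if r == 63 else "cv_single"
-- ===== Notes on version B (the rewrite author's own statement) =====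
-- stated objective: alternative
-- what changed: The landmark branch no longer probes the header set for 126 fixed expected names (2 prefixes x 21 indices x 3 axes); instead B makes one pass over the distinct columns, parsing each as '<R|L>_<axis><idx>' with idx a canonical decimal 0..20, and counts the R- and L-matches.
import Mathlib
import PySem

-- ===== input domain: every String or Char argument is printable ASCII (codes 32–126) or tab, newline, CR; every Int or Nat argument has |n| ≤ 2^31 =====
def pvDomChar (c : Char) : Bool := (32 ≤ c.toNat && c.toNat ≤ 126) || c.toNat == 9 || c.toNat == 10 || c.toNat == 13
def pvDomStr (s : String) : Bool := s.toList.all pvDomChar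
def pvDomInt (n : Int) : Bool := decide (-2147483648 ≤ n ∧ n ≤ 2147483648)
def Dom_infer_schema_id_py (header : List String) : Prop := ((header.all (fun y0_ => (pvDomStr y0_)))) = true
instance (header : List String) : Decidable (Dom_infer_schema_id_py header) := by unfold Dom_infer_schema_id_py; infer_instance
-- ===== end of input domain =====

-- B replaces A's 126 fixed-name probes by one parsing pass over the distinct columns (objective: alternative).

-- ===== PORT A =====
def count_landmark_dims_py (header : List String) (pfx : String) : Int :=
  let columns : PySem.Set String := PySem.Set.ofList header
  (PySem.List.pyRange 0 21 1).foldl (fun dim idx =>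
    ["x", "y", "z"].foldl (fun dim axis =>
      if PySem.Set.contains columns (pfx ++ "_" ++ axis ++ PySem.Int.toStr idx) then dim + 1 else dim) dim) 0

def infer_schema_id_py (header : List String) : String :=
  let columns : PySem.Set String := PySem.Set.ofList header
  let has_sensor := columns.any (fun col => PySem.Str.startswith col "sensor_")
  if has_sensor then
    if columns.any (fun col => PySem.Str.startswith col "sensor_left_" || PySem.Str.startswith col "sensor_right_")
    then "fusion_dual" else "fusion_single"
  else if count_landmark_dims_py header "L" + count_landmark_dims_py header "R" > 0 then
    (if count_landmark_dims_py header "R" = 63 then "cv_dual" else "cv_single")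
  else "unknown"

-- ===== PORT B =====
def pvIsDigitChar (c : Char) : Bool := '0' ≤ c && c ≤ '9'

def pvIsAxisChar (c : Char) : Bool := c == 'x' || c == 'y' || c == 'z'

def is_landmark (col : String) (p : Char) : Bool :=
  match col.toList with
  | [q, u, a, d] => q == p && u == '_' && pvIsAxisChar a && pvIsDigitChar d
  | [q, u, a, d1, d2] =>
      q == p && u == '_' && pvIsAxisChar a && pvIsDigitChar d2 && (d1 == '1' || (d1 == '2' && d2 == '0'))
  | _ => false

def infer_schema_id_py_alt (header : List String) : String :=
  let columns : PySem.Set String := PySem.Set.ofList header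
  let has_sensor := columns.any (fun col => PySem.Str.startswith col "sensor_")
  if has_sensor then
    if columns.any (fun col => PySem.Str.startswith col "sensor_left_" || PySem.Str.startswith col "sensor_right_")
    then "fusion_dual" else "fusion_single"
  else
    let r : Int := (columns.countP (fun col => is_landmark col 'R') : Int)
    let l : Int := (columns.countP (fun col => is_landmark col 'L') : Int)
    if r + l = 0 then "unknown"
    else if r = 63 then "cv_dual" else "cv_single"

-- ===== PRECONDITION & SPEC =====
def Spec_infer_schema_id_py (header : List String) (out : String) : Prop := out = infer_schema_id_py_alt header
instance (header : List String) (out : String) : Decidable (Spec_infer_schema_id_py header out) := by unfold Spec_infer_schema_id_py; infer_instance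

-- ===== CLAIM (what is proved, stated in full; the proofs are below) =====
def Claim_equal_infer_schema_id_py : Prop := ∀ (header : List String), Dom_infer_schema_id_py header → Spec_infer_schema_id_py header (infer_schema_id_py header)

-- ===== LEMMAS AND PROOFS =====

-- the 63 landmark names A probes for a given prefix
def pvNames (p : String) : List String :=
  (PySem.List.pyRange 0 21 1).flatMap (fun i =>
    ["x", "y", "z"].map (fun a => p ++ "_" ++ a ++ PySem.Int.toStr i))

-- the 63 name tails: '_' :: axis :: decimal digits of 0..20
def pvTails : List (List Char) :=
  (PySem.List.pyRange 0 21 1).flatMap (fun i =>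
    ['x', 'y', 'z'].map (fun a => '_' :: a :: (PySem.Int.toStr i).toList))

theorem pvTails_eq : pvTails =
  [['_', 'x', '0'], ['_', 'y', '0'], ['_', 'z', '0'],
   ['_', 'x', '1'], ['_', 'y', '1'], ['_', 'z', '1'],
   ['_', 'x', '2'], ['_', 'y', '2'], ['_', 'z', '2'],
   ['_', 'x', '3'], ['_', 'y', '3'], ['_', 'z', '3'],
   ['_', 'x', '4'], ['_', 'y', '4'], ['_', 'z', '4'],
   ['_', 'x', '5'], ['_', 'y', '5'], ['_', 'z', '5'],
   ['_', 'x', '6'], ['_', 'y', '6'], ['_', 'z', '6'],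
   ['_', 'x', '7'], ['_', 'y', '7'], ['_', 'z', '7'],
   ['_', 'x', '8'], ['_', 'y', '8'], ['_', 'z', '8'],
   ['_', 'x', '9'], ['_', 'y', '9'], ['_', 'z', '9'],
   ['_', 'x', '1', '0'], ['_', 'y', '1', '0'], ['_', 'z', '1', '0'],
   ['_', 'x', '1', '1'], ['_', 'y', '1', '1'], ['_', 'z', '1', '1'],
   ['_', 'x', '1', '2'], ['_', 'y', '1', '2'], ['_', 'z', '1', '2'],
   ['_', 'x', '1', '3'], ['_', 'y', '1', '3'], ['_', 'z', '1', '3'],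
   ['_', 'x', '1', '4'], ['_', 'y', '1', '4'], ['_', 'z', '1', '4'],
   ['_', 'x', '1', '5'], ['_', 'y', '1', '5'], ['_', 'z', '1', '5'],
   ['_', 'x', '1', '6'], ['_', 'y', '1', '6'], ['_', 'z', '1', '6'],
   ['_', 'x', '1', '7'], ['_', 'y', '1', '7'], ['_', 'z', '1', '7'],
   ['_', 'x', '1', '8'], ['_', 'y', '1', '8'], ['_', 'z', '1', '8'],
   ['_', 'x', '1', '9'], ['_', 'y', '1', '9'], ['_', 'z', '1', '9'],
   ['_', 'x', '2', '0'], ['_', 'y', '2', '0'], ['_', 'z', '2', '0']] := by decide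

theorem char_eq_of_toNat (d e : Char) (h : d.toNat = e.toNat) : d = e := by
  apply Char.ext_iff.mpr
  exact UInt32.toNat_inj.mp h

theorem digit_cases (d : Char) (h : pvIsDigitChar d = true) :
    d = '0' ∨ d = '1' ∨ d = '2' ∨ d = '3' ∨ d = '4' ∨ d = '5' ∨ d = '6' ∨ d = '7' ∨ d = '8' ∨ d = '9' := by
  simp only [pvIsDigitChar, Bool.and_eq_true, decide_eq_true_eq] at h
  obtain ⟨h1, h2⟩ := h
  have b1 : 48 ≤ d.toNat := h1
  have b2 : d.toNat ≤ 57 := h2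
  interval_cases hd : d.toNat
  · exact Or.inl (char_eq_of_toNat _ _ hd)
  · exact Or.inr (Or.inl (char_eq_of_toNat _ _ hd))
  · exact Or.inr (Or.inr (Or.inl (char_eq_of_toNat _ _ hd)))
  · exact Or.inr (Or.inr (Or.inr (Or.inl (char_eq_of_toNat _ _ hd))))
  · exact Or.inr (Or.inr (Or.inr (Or.inr (Or.inl (char_eq_of_toNat _ _ hd)))))
  · exact Or.inr (Or.inr (Or.inr (Or.inr (Or.inr (Or.inl (char_eq_of_toNat _ _ hd))))))
  · exact Or.inr (Or.inr (Or.inr (Or.inr (Or.inr (Or.inr (Or.inl (char_eq_of_toNat _ _ hd)))))))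
  · exact Or.inr (Or.inr (Or.inr (Or.inr (Or.inr (Or.inr (Or.inr (Or.inl (char_eq_of_toNat _ _ hd))))))))
  · exact Or.inr (Or.inr (Or.inr (Or.inr (Or.inr (Or.inr (Or.inr (Or.inr (Or.inl (char_eq_of_toNat _ _ hd)))))))))
  · exact Or.inr (Or.inr (Or.inr (Or.inr (Or.inr (Or.inr (Or.inr (Or.inr (Or.inr (char_eq_of_toNat _ _ hd)))))))))

theorem mem_pvNames_of_tail (pc : Char) (t : List Char) (c : String)
    (ht : ('_' :: t) ∈ pvTails) (hc : c.toList = pc :: '_' :: t) :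
    c ∈ pvNames (String.ofList [pc]) := by
  simp only [pvTails, List.mem_flatMap, List.mem_map] at ht
  obtain ⟨i, hi, a, ha, heq⟩ := ht
  have hax : a = 'x' ∨ a = 'y' ∨ a = 'z' := by simpa using ha
  simp only [pvNames, List.mem_flatMap, List.mem_map]
  rcases hax with rfl | rfl | rfl
  · exact ⟨i, hi, "x", by simp, String.toList_inj.mp (by simp [hc, ← heq])⟩
  · exact ⟨i, hi, "y", by simp, String.toList_inj.mp (by simp [hc, ← heq])⟩
  · exact ⟨i, hi, "z", by simp, String.toList_inj.mp (by simp [hc, ← heq])⟩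

theorem is_landmark_of_tail (pc : Char) (t : List Char) (c : String)
    (ht : t ∈ pvTails) (hc : c.toList = pc :: t) : is_landmark c pc = true := by
  rw [pvTails_eq] at ht
  fin_cases ht <;> simp [is_landmark, hc, pvIsAxisChar, pvIsDigitChar]

theorem is_landmark_iff (pc : Char) (c : String) :
    is_landmark c pc = true ↔ c ∈ pvNames (String.ofList [pc]) := by
  constructor
  · intro h
    rcases hc : c.toList with _ | ⟨q, _ | ⟨u, _ | ⟨a, _ | ⟨d, _ | ⟨d2, _ | ⟨e, rest⟩⟩⟩⟩⟩⟩ <;>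
      simp only [is_landmark, hc] at h <;>
      try exact (Bool.false_ne_true h).elim
    -- length 4
    · simp only [Bool.and_eq_true, beq_iff_eq] at h
      obtain ⟨⟨⟨rfl, rfl⟩, ha⟩, hd⟩ := h
      have hax : a = 'x' ∨ a = 'y' ∨ a = 'z' := by
        simp [pvIsAxisChar] at ha; tauto
      rcases digit_cases d hd with rfl | rfl | rfl | rfl | rfl | rfl | rfl | rfl | rfl | rfl <;>
        rcases hax with rfl | rfl | rfl <;>
        exact mem_pvNames_of_tail q _ c (by rw [pvTails_eq]; decide) hc
    -- length 5
    · simp only [Bool.and_eq_true, Bool.or_eq_true, beq_iff_eq] at h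
      obtain ⟨⟨⟨⟨rfl, rfl⟩, ha⟩, hd2⟩, hd1⟩ := h
      have hax : a = 'x' ∨ a = 'y' ∨ a = 'z' := by
        simp [pvIsAxisChar] at ha; tauto
      rcases hd1 with rfl | ⟨rfl, rfl⟩
      · rcases digit_cases d2 hd2 with rfl | rfl | rfl | rfl | rfl | rfl | rfl | rfl | rfl | rfl <;>
          rcases hax with rfl | rfl | rfl <;>
          exact mem_pvNames_of_tail q _ c (by rw [pvTails_eq]; decide) hc
      · rcases hax with rfl | rfl | rfl <;>
          exact mem_pvNames_of_tail q _ c (by rw [pvTails_eq]; decide) hc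
  · intro h
    simp only [pvNames, List.mem_flatMap, List.mem_map] at h
    obtain ⟨i, hi, ax, hax, rfl⟩ := h
    have hi' : 0 ≤ i ∧ i < 21 := by
      simpa using (PySem.List.mem_pyRange_one).mp hi
    obtain ⟨hi0, hi21⟩ := hi'
    have hax' : ax = "x" ∨ ax = "y" ∨ ax = "z" := by simpa using hax
    rcases hax' with rfl | rfl | rfl
    · have hct : (String.ofList [pc] ++ "_" ++ "x" ++ PySem.Int.toStr i).toList
          = pc :: ('_' :: 'x' :: (PySem.Int.toStr i).toList) := by simp
      exact is_landmark_of_tail pc _ _ (by interval_cases i <;> decide) hct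
    · have hct : (String.ofList [pc] ++ "_" ++ "y" ++ PySem.Int.toStr i).toList
          = pc :: ('_' :: 'y' :: (PySem.Int.toStr i).toList) := by simp
      exact is_landmark_of_tail pc _ _ (by interval_cases i <;> decide) hct
    · have hct : (String.ofList [pc] ++ "_" ++ "z" ++ PySem.Int.toStr i).toList
          = pc :: ('_' :: 'z' :: (PySem.Int.toStr i).toList) := by simp
      exact is_landmark_of_tail pc _ _ (by interval_cases i <;> decide) hct

theorem count_foldl_aux (p : String) (S : PySem.Set String) (L : List Int) (init : Int) :
    L.foldl (fun dim idx =>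
      ["x", "y", "z"].foldl (fun dim axis =>
        if PySem.Set.contains S (p ++ "_" ++ axis ++ PySem.Int.toStr idx) then dim + 1 else dim) dim) init
    = init + (((L.flatMap (fun i => ["x", "y", "z"].map (fun a => p ++ "_" ++ a ++ PySem.Int.toStr i))).countP
        (fun n => PySem.Set.contains S n) : Nat) : Int) := by
  induction L generalizing init with
  | nil => simp
  | cons i L ih =>
    rw [List.foldl_cons, ih]
    simp only [List.flatMap_cons, List.countP_append, List.map, List.foldl,
      List.countP_cons, List.countP_nil]
    split_ifs <;> push_cast <;> omega

theorem countA_eq (h : List String) (p : String) :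
    count_landmark_dims_py h p
      = (((pvNames p).countP (fun n => PySem.Set.contains (PySem.Set.ofList h) n) : Nat) : Int) := by
  simp only [count_landmark_dims_py]
  rw [count_foldl_aux]
  simp [pvNames]

theorem countP_swap (l1 l2 : List String) (h1 : l1.Nodup) (h2 : l2.Nodup) :
    l1.countP (fun x => l2.contains x) = l2.countP (fun x => l1.contains x) := by
  rw [List.countP_eq_length_filter, List.countP_eq_length_filter]
  apply List.Perm.length_eq
  apply (List.perm_ext_iff_of_nodup (h1.filter _) (h2.filter _)).mpr
  intro a
  simp only [List.mem_filter, List.contains_iff_mem]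
  tauto

theorem nodup_pvNames_R : (pvNames "R").Nodup := by decide

theorem nodup_pvNames_L : (pvNames "L").Nodup := by decide

theorem count_eq_alt (h : List String) (pc : Char) (hn : (pvNames (String.ofList [pc])).Nodup) :
    count_landmark_dims_py h (String.ofList [pc])
      = (((PySem.Set.ofList h).countP (fun col => is_landmark col pc) : Nat) : Int) := by
  rw [countA_eq]
  congr 1
  simp only [PySem.Set.contains_eq_listContains]
  rw [countP_swap _ _ hn (PySem.Set.nodup_ofList h)]
  apply List.countP_congr
  intro x _
  rw [Bool.eq_iff_iff]
  simp [is_landmark_iff]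

theorem ports_agree (h : List String) : infer_schema_id_py h = infer_schema_id_py_alt h := by
  have hR : count_landmark_dims_py h "R"
      = (((PySem.Set.ofList h).countP (fun col => is_landmark col 'R') : Nat) : Int) := by
    have := count_eq_alt h 'R' (by rw [show String.ofList ['R'] = "R" from by decide]; exact nodup_pvNames_R)
    rwa [show String.ofList ['R'] = "R" from by decide] at this
  have hL : count_landmark_dims_py h "L"
      = (((PySem.Set.ofList h).countP (fun col => is_landmark col 'L') : Nat) : Int) := by
    have := count_eq_alt h 'L' (by rw [show String.ofList ['L'] = "L" from by decide]; exact nodup_pvNames_L)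
    rwa [show String.ofList ['L'] = "L" from by decide] at this
  unfold infer_schema_id_py infer_schema_id_py_alt
  simp only [hR, hL]
  split_ifs <;> first | rfl | omega

-- ===== VERDICT (by name: the statement is the Claim_ definition above) =====
theorem infer_schema_id_py_spec : Claim_equal_infer_schema_id_py := by
  intro header _
  unfold Spec_infer_schema_id_py
  exact ports_agree header
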